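-- pv_equiv track=rewrite | github.com/RAIL-group/Task-Planning-ai2Thor | modules/taskplan/taskplan/pddl/helper.py | update_problem_find
-- ===== SOURCE A (Python) =====
-- def update_problem_find(problem, obj, loc):
--     y = f'(not (is-located {obj}))'
--     z = f'        (is-at {obj} {loc})'
--     insert_z = None
--     lines = problem.splitlines()
--     for line_idx, line in enumerate(lines):
--         if y in line:
--             line = f'        (is-located {obj})'
--             lines[line_idx] = line
--             insert_z = line_idx + 1
--     if insert_z:
--         lines.insert(insert_z, z)
--     updated_pddl_problem = '\n'.join(lines)
--     return updated_pddl_problem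
-- ===== SOURCE B (Python) =====
-- def update_problem_find(problem, obj, loc):
--     y = f'(not (is-located {obj}))'
--     rep = f'        (is-located {obj})'
--     z = f'        (is-at {obj} {loc})'
--     out = []
--     inserted = False
--     for line in reversed(problem.splitlines()):
--         if y in line:
--             if not inserted:
--                 out.append(z)
--                 inserted = True
--             out.append(rep)
--         else:
--             out.append(line)
--     return '\n'.join(reversed(out))
-- ===== Notes on version B (the rewrite author's own statement) =====
-- stated objective: alternative
-- what changed: B scans the lines in REVERSE with a boolean flag and builds the output back-to-front with an accumulator (emitting the is-at line immediately before the first match seen from the end), so it has no indices, no in-place overwrites and no list.insert, unlike A's forward loop that mutates the list by index and tracks the last match position for a later insert.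
import Mathlib
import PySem

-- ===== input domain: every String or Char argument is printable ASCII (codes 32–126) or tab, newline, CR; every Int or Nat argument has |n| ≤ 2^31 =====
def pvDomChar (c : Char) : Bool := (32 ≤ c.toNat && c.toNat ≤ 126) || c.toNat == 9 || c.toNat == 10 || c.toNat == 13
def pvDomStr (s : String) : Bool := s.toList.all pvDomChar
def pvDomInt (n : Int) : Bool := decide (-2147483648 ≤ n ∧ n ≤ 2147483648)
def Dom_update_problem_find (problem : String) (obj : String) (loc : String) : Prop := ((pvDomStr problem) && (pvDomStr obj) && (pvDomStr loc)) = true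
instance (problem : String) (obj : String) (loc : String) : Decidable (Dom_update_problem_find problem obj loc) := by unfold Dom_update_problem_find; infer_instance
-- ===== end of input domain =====

-- B replaces A's forward loop (index mutation + tracked insert position) by a single
-- reverse scan with a boolean flag that builds the output back-to-front; return value
-- only, neither touches its arguments. Objective: alternative (same cost).

-- ===== PORT A =====
-- literal transliteration of A: one fold over enumerate(lines) that both
-- overwrites matching lines and tracks insert_z = last match index + 1;
-- 'if insert_z:' is the Python truthiness test (None or 0 falsy).
def update_problem_find (problem : String) (obj : String) (loc : String) : String :=
  let y := String.ofList ("(not (is-located ".toList ++ obj.toList ++ "))".toList)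
  let z := String.ofList ("        (is-at ".toList ++ obj.toList ++ " ".toList ++ loc.toList ++ ")".toList)
  let lines0 := PySem.Str.splitlines problem
  let st := (PySem.List.enumerate lines0 0).foldl
    (fun (st : List String × Option Int) p =>
      if PySem.Str.isIn y p.2 then
        (st.1.set p.1.toNat (String.ofList ("        (is-located ".toList ++ obj.toList ++ ")".toList)),
         some (p.1 + 1))
      else st)
    (lines0, none)
  let lines1 := match st.2 with
    | none => st.1
    | some iz => if iz == 0 then st.1 else PySem.List.insert st.1 iz z
  PySem.Str.join "\n" lines1

-- ===== PORT B =====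
-- transliteration of Source B: one fold over reversed(splitlines) with state
-- (out, inserted); on a match the is-at line is emitted once, before the first
-- match seen from the end; the output is reversed at the end.
def update_problem_find_alt (problem : String) (obj : String) (loc : String) : String :=
  let y := String.ofList ("(not (is-located ".toList ++ obj.toList ++ "))".toList)
  let rep := String.ofList ("        (is-located ".toList ++ obj.toList ++ ")".toList)
  let z := String.ofList ("        (is-at ".toList ++ obj.toList ++ " ".toList ++ loc.toList ++ ")".toList)
  let st := (PySem.Str.splitlines problem).reverse.foldl
    (fun (st : List String × Bool) line =>
      if PySem.Str.isIn y line then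
        if st.2 then (st.1 ++ [rep], true) else (st.1 ++ [z, rep], true)
      else (st.1 ++ [line], st.2))
    ([], false)
  PySem.Str.join "\n" st.1.reverse

-- ===== PRECONDITION & SPEC =====
def Spec_update_problem_find (problem : String) (obj : String) (loc : String) (out : String) : Prop := out = update_problem_find_alt problem obj loc
instance (problem : String) (obj : String) (loc : String) (out : String) : Decidable (Spec_update_problem_find problem obj loc out) := by unfold Spec_update_problem_find; infer_instance

-- ===== CLAIM (what is proved, stated in full; the proofs are below) =====
def Claim_equal_update_problem_find : Prop := ∀ (problem : String) (obj : String) (loc : String), Dom_update_problem_find problem obj loc → Spec_update_problem_find problem obj loc (update_problem_find problem obj loc)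

-- ===== LEMMAS AND PROOFS =====

-- pure recursion computed by B's reverse fold (over the reversed line list)
def pvF {α : Type} (P : α → Bool) (rep z : α) : List α → Bool → List α
  | [], _ => []
  | l :: ls, ins => (if P l then (if ins then [rep] else [z, rep]) else [l]) ++ pvF P rep z ls (ins || P l)

-- B's fold characterized by pvF
theorem pvB_foldl {α : Type} (P : α → Bool) (rep z : α) :
    ∀ (ys : List α) (acc : List α) (ins : Bool),
    ys.foldl (fun (st : List α × Bool) l =>
        if P l then
          if st.2 then (st.1 ++ [rep], true) else (st.1 ++ [z, rep], true)
        else (st.1 ++ [l], st.2)) (acc, ins)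
      = (acc ++ pvF P rep z ys ins, ins || ys.any P) := by
  intro ys
  induction ys with
  | nil => intro acc ins; simp [pvF]
  | cons l ls ih =>
    intro acc ins
    by_cases h : P l
    · cases ins <;> simp [pvF, h, ih, List.append_assoc]
    · simp [pvF, h, ih, List.append_assoc]

-- once the flag is set, pvF is just the line-replacement map
theorem pvF_true {α : Type} (P : α → Bool) (rep z : α) :
    ∀ (ls : List α), pvF P rep z ls true = ls.map (fun l => if P l then rep else l) := by
  intro ls
  induction ls with
  | nil => simp [pvF]
  | cons l ls ih => by_cases h : P l <;> simp [pvF, h, ih]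

-- A's fused fold: first component is the fold of sets over the hit indices,
-- second is (last hit + 1) when there is a hit.
theorem pv_loop_eq {α : Type} (P : α → Bool) (rep : α) (xs : List α) : ∀ (s : Int) (ls : List α) (z0 : Option Int),
    (PySem.List.enumerate xs s).foldl
      (fun (st : List α × Option Int) p =>
        if P p.2 then (st.1.set p.1.toNat rep, some (p.1 + 1)) else st)
      (ls, z0)
    = ((((PySem.List.enumerate xs s).filter (fun p => P p.2)).map Prod.fst).foldl
        (fun l i => l.set i.toNat rep) ls,
       match (((PySem.List.enumerate xs s).filter (fun p => P p.2)).map Prod.fst).getLast? with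
       | none => z0
       | some i => some (i + 1)) := by
  induction xs with
  | nil => intro s ls z0; simp [PySem.List.enumerate_nil]
  | cons x xs ih =>
    intro s ls z0
    rw [PySem.List.enumerate_cons, List.foldl_cons, List.filter_cons]
    by_cases h : P x
    · simp only [h, if_true, List.map_cons, List.foldl_cons, List.getLast?_cons]
      rw [ih]
      rcases hrest : (((PySem.List.enumerate xs (s + 1)).filter (fun p => P p.2)).map Prod.fst).getLast? with _ | i
      · rw [hrest]; simp only [Option.getD_none]
      · rw [hrest]; simp only [Option.getD_some]
    · rw [Bool.not_eq_true] at h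
      simp only [h, Bool.false_eq_true, if_false]
      exact ih (s + 1) ls z0

-- the fold of sets over the hit indices is the line-replacement map
theorem pv_set_map {α : Type} (P : α → Bool) (rep : α) :
    ∀ (xs pre : List α),
    (((PySem.List.enumerate xs (pre.length : Int)).filter (fun p => P p.2)).map Prod.fst).foldl
        (fun l i => l.set i.toNat rep) (pre ++ xs)
      = pre ++ xs.map (fun l => if P l then rep else l) := by
  intro xs
  induction xs with
  | nil => intro pre; simp [PySem.List.enumerate_nil]
  | cons x xs ih =>
    intro pre
    rw [PySem.List.enumerate_cons, List.filter_cons]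
    by_cases h : P x
    · simp only [h, if_true, List.map_cons, List.foldl_cons, Int.toNat_natCast]
      have hset : (pre ++ x :: xs).set pre.length rep = (pre ++ [rep]) ++ xs := by
        rw [List.set_append]
        simp
      rw [hset]
      have hcast : ((pre.length : Int) + 1) = (((pre ++ [rep]).length : Nat) : Int) := by
        simp
      rw [hcast, ih (pre ++ [rep])]
      simp [h]
    · rw [Bool.not_eq_true] at h
      simp only [h, Bool.false_eq_true, if_false]
      have hsplit : pre ++ x :: xs = (pre ++ [x]) ++ xs := by simp
      have hcast : ((pre.length : Int) + 1) = (((pre ++ [x]).length : Nat) : Int) := by simp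
      rw [hsplit, hcast, ih (pre ++ [x])]
      simp [h]

-- pv_set_map at the start of the list
theorem pv_set_map0 {α : Type} (P : α → Bool) (rep : α) (xs : List α) :
    (((PySem.List.enumerate xs 0).filter (fun p => P p.2)).map Prod.fst).foldl
        (fun l i => l.set i.toNat rep) xs
      = xs.map (fun l => if P l then rep else l) := by
  have h := pv_set_map P rep xs []
  simpa using h

-- every hit index of the enumeration from s lies in [s, s + len)
theorem pv_hits_bounds {α : Type} (P : α → Bool) (xs : List α) (s : Int) (i : Int)
    (hi : i ∈ ((PySem.List.enumerate xs s).filter (fun p => P p.2)).map Prod.fst) :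
    s ≤ i ∧ i < s + xs.length := by
  simp only [List.mem_map, List.mem_filter] at hi
  obtain ⟨p, ⟨hp, _⟩, rfl⟩ := hi
  rw [PySem.List.mem_enumerate_iff] at hp
  obtain ⟨k, hk, rfl⟩ := hp
  constructor
  · simp
  · simp; omega

-- A's post-loop list (map + possible insert after the last hit) as a function of the hits
def pvG {α : Type} (P : α → Bool) (rep z : α) (xs : List α) : List α :=
  match (((PySem.List.enumerate xs 0).filter (fun p => P p.2)).map Prod.fst).getLast? with
  | none => xs.map (fun l => if P l then rep else l)
  | some i => if (i + 1) == 0 then xs.map (fun l => if P l then rep else l)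
              else PySem.List.insert (xs.map (fun l => if P l then rep else l)) (i + 1) z

-- the last hit of a snoc list
theorem pv_hits_snoc {α : Type} (P : α → Bool) (ys : List α) (x : α) (s : Int) :
    (((PySem.List.enumerate (ys ++ [x]) s).filter (fun p => P p.2)).map Prod.fst).getLast?
    = if P x then some (s + ys.length)
      else (((PySem.List.enumerate ys s).filter (fun p => P p.2)).map Prod.fst).getLast? := by
  rw [PySem.List.enumerate_append, List.filter_append, List.map_append, List.getLast?_append]
  by_cases h : P x
  · simp [PySem.List.enumerate_cons, PySem.List.enumerate_nil, h]
  · simp [PySem.List.enumerate_cons, PySem.List.enumerate_nil, h]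

-- core equality: A's list (pvG) equals B's reverse-built list
theorem pv_G_eq_F {α : Type} (P : α → Bool) (rep z : α) :
    ∀ (xs : List α), pvG P rep z xs = (pvF P rep z xs.reverse false).reverse := by
  intro xs
  induction xs using List.reverseRecOn with
  | nil => simp [pvG, pvF, PySem.List.enumerate_nil]
  | append_singleton ys x ih =>
    rw [List.reverse_append, List.reverse_singleton, List.singleton_append]
    by_cases h : P x
    · -- last line matches: insert lands at the very end
      simp only [pvF, h, if_true, Bool.false_or, pvF_true, List.reverse_append, List.reverse_reverse, List.map_reverse]
      unfold pvG
      rw [pv_hits_snoc]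
      simp only [h, if_true, Int.zero_add]
      have hne : (((ys.length : Int) + 1) == 0) = false := by simp; omega
      rw [hne]
      simp only [Bool.false_eq_true, if_false, List.map_append, List.map_cons, List.map_nil, h, if_true]
      have hlen : ((ys.length : Int) + 1) = (((ys.map (fun l => if P l then rep else l) ++ [rep]).length : Nat) : Int) := by simp
      rw [hlen, PySem.List.insert_natCast _ _ _ (le_refl _)]
      rw [List.take_of_length_le (le_refl _), List.drop_of_length_le (le_refl _)]
      simp
    · -- last line does not match: it is carried through unchanged on both sides
      simp only [pvF, h, Bool.false_eq_true, if_false, Bool.or_false, List.reverse_cons, List.singleton_append]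
      rw [← ih]
      unfold pvG
      rw [pv_hits_snoc]
      simp only [h, Bool.false_eq_true, if_false]
      rcases hl : (((PySem.List.enumerate ys 0).filter (fun p => P p.2)).map Prod.fst).getLast? with _ | i
      · rw [hl]; simp [h]
      · rw [hl]
        have hb := pv_hits_bounds P ys 0 i (List.mem_of_getLast? hl)
        have hne : ((i + 1) == (0 : Int)) = false := by simp; omega
        simp only [hne, Bool.false_eq_true, if_false, List.map_append, List.map_cons, List.map_nil, h, if_false]
        -- insert position i+1 ≤ ys.length, so inserting commutes with the appended [x]
        have hle : (i + 1).toNat ≤ (ys.map (fun l => if P l then rep else l)).length := by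
          simp; omega
        have hi1 : (i + 1) = (((i + 1).toNat : Nat) : Int) := by omega
        rw [hi1, PySem.List.insert_natCast _ _ _ hle,
            PySem.List.insert_natCast _ _ _ (by simp; omega)]
        rw [List.take_append_of_le_length (by simpa using hle), List.drop_append_of_le_length (by simpa using hle)]
        simp [h]

theorem pv_main (problem obj loc : String) :
    update_problem_find problem obj loc = update_problem_find_alt problem obj loc := by
  simp only [update_problem_find, update_problem_find_alt]
  rw [pv_loop_eq]
  rw [pvB_foldl]
  rw [pv_set_map0]
  have hGF := pv_G_eq_F (PySem.Str.isIn (String.ofList ("(not (is-located ".toList ++ obj.toList ++ "))".toList)))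
    (String.ofList ("        (is-located ".toList ++ obj.toList ++ ")".toList))
    (String.ofList ("        (is-at ".toList ++ obj.toList ++ " ".toList ++ loc.toList ++ ")".toList))
    (PySem.Str.splitlines problem)
  unfold pvG at hGF
  rcases hk : (((PySem.List.enumerate (PySem.Str.splitlines problem) 0).filter
      (fun p => PySem.Str.isIn (String.ofList ("(not (is-located ".toList ++ obj.toList ++ "))".toList)) p.2)).map Prod.fst).getLast? with _ | i <;>
    rw [hk] at hGF <;> rw [hk] <;> simpa using congrArg (PySem.Str.join "\n") hGF

-- ===== VERDICT (by name: the statement is the Claim_ definition above) =====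
theorem update_problem_find_spec : Claim_equal_update_problem_find := by
  intro problem obj loc _
  exact pv_main problem obj loc
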